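-- pv_equiv track=rewrite | github.com/equinor/standalones2rc | standalones2rc/_section_dictionary.py | section_dictionary
-- ===== SOURCE A (Python) =====
-- def section_dictionary(content):
--     # Returns a dictionary which gives the current section given a line number in the .DATA file
--
--     content = [x.strip() for x in content]
--
--     sections = [
--         "RUNSPEC",
--         "GRID",
--         "EDIT",
--         "PROPS",
--         "REGIONS",
--         "SOLUTION",
--         "SUMMARY",
--         "SCHEDULE",
--     ]
--
--     dictionary = {}
--
--     for section in sections:
--         if content.count(section) > 0:
--             dictionary[content.index(section)] = section
--
--     current_section = None
--
--     for i in range(len(content)):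
--         if i in dictionary:
--             current_section = dictionary[i]
--
--         dictionary[i] = current_section
--
--     return dictionary
-- ===== SOURCE B (Python) =====
-- SECTIONS = (
--     "RUNSPEC", "GRID", "EDIT", "PROPS",
--     "REGIONS", "SOLUTION", "SUMMARY", "SCHEDULE",
-- )
--
--
-- def section_dictionary(content):
--     # Segment decomposition: record each section's first line in one scan,
--     # then fill whole [cut, next_cut) blocks with a constant name instead of
--     # running a stateful per-line forward fill.
--     stripped = [x.strip() for x in content]
--
--     starts = {}
--     for i, line in enumerate(stripped):
--         if line in SECTIONS and line not in starts:
--             starts[line] = i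
--
--     dictionary = {starts[s]: s for s in SECTIONS if s in starts}
--
--     cuts = sorted(dictionary)
--     names = [None] + [dictionary[c] for c in cuts]
--     bounds = [0] + cuts + [len(stripped)]
--
--     for name, (lo, hi) in zip(names, zip(bounds, bounds[1:])):
--         for i in range(lo, hi):
--             dictionary[i] = name
--
--     return dictionary
-- ===== Notes on version B (the rewrite author's own statement) =====
-- stated objective: alternative
-- what changed: A builds its cut table with eight count()-then-index() scans and then runs a stateful per-line forward fill carrying current_section; B records first occurrences in one enumerate scan, sorts the cut positions, and fills each [cut, next_cut) block with its constant section name (zip over segment bounds), with no per-line state or membership test.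
import Mathlib
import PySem

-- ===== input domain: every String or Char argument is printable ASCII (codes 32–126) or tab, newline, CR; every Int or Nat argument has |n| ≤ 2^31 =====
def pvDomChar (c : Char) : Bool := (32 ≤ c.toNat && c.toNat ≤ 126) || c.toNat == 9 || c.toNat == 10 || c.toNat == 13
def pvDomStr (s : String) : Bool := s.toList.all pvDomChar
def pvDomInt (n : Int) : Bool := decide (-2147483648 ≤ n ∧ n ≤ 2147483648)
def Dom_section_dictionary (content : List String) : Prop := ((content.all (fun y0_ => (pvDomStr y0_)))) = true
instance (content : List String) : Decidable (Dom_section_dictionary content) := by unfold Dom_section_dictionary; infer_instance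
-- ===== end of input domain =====

-- B replaces A's eight count/index scans and stateful per-line forward fill by a
-- one-scan first-occurrence table plus constant filling of whole [cut, next_cut)
-- segments (objective: alternative algorithm, same result).

-- ===== PORT A =====
def section_dictionary (content : List String) : List (Int × Option String) :=
  let content := content.map PySem.Str.strip
  let sections : List String :=
    ["RUNSPEC", "GRID", "EDIT", "PROPS", "REGIONS", "SOLUTION", "SUMMARY", "SCHEDULE"]
  let dictionary : PySem.Dict Int (Option String) :=
    sections.foldl (fun d s =>
      if PySem.List.count content s > 0 then
        match PySem.List.index? content s with
        | some k => d.insert (k : Int) (some s)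
        | none => d          -- unreachable: count > 0 guards index
      else d) PySem.Dict.empty
  let res := (PySem.List.pyRange 0 (content.length : Int) 1).foldl
    (fun (p : PySem.Dict Int (Option String) × Option String) i =>
      let cur := match p.1.get? i with | some v => v | none => p.2
      (p.1.insert i cur, cur)) (dictionary, none)
  res.1.items

-- ===== PORT B =====
def pvSECTIONS : List String :=
  ["RUNSPEC", "GRID", "EDIT", "PROPS", "REGIONS", "SOLUTION", "SUMMARY", "SCHEDULE"]

-- Source B's inner loop `for i in range(lo, hi): dictionary[i] = name` as a helper
def pvRangeFill (d : PySem.Dict Int (Option String)) (name : Option String)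
    (lo hi : Int) : PySem.Dict Int (Option String) :=
  (PySem.List.pyRange lo hi 1).foldl (fun d i => d.insert i name) d

def section_dictionary_alt (content : List String) : List (Int × Option String) :=
  let stripped := content.map PySem.Str.strip
  let starts : PySem.Dict String Int :=
    (PySem.List.enumerate stripped 0).foldl (fun st p =>
      if pvSECTIONS.contains p.2 && !(st.contains p.2) then st.insert p.2 p.1 else st)
      PySem.Dict.empty
  let dictionary : PySem.Dict Int (Option String) :=
    pvSECTIONS.foldl (fun d s =>
      match starts.get? s with
      | some i => d.insert i (some s)
      | none => d) PySem.Dict.empty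
  let cuts := PySem.List.sorted dictionary.keys (fun x => x) false
  let names := none :: cuts.map (fun c => (dictionary.get? c).getD none)  -- c ∈ keys: getD none is dictionary[c]
  let bounds := (0 : Int) :: cuts ++ [(stripped.length : Int)]
  let res := (names.zip (bounds.zip bounds.tail)).foldl
    (fun d (p : Option String × Int × Int) => pvRangeFill d p.1 p.2.1 p.2.2)
    dictionary
  res.items

-- ===== PRECONDITION & SPEC =====
def Spec_section_dictionary (content : List String) (out : List (Int × Option String)) : Prop := out = section_dictionary_alt content
instance (content : List String) (out : List (Int × Option String)) : Decidable (Spec_section_dictionary content out) := by unfold Spec_section_dictionary; infer_instance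

-- ===== CLAIM (what is proved, stated in full; the proofs are below) =====
def Claim_equal_section_dictionary : Prop := ∀ (content : List String), Dom_section_dictionary content → Spec_section_dictionary content (section_dictionary content)

-- ===== LEMMAS AND PROOFS =====

-- B's first-pass step function (for stating the invariant).
def pvStartsStep (st : PySem.Dict String Int) (p : Int × String) : PySem.Dict String Int :=
  if pvSECTIONS.contains p.2 && !(st.contains p.2) then st.insert p.2 p.1 else st

-- A's forward-fill step and loop, as named functions.
def pvAStep (p : PySem.Dict Int (Option String) × Option String) (i : Int) :
    PySem.Dict Int (Option String) × Option String :=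
  let cur := (p.1.get? i).getD p.2
  (p.1.insert i cur, cur)

def pvAFill (d : PySem.Dict Int (Option String)) (cur : Option String) (lo hi : Int) :
    PySem.Dict Int (Option String) × Option String :=
  (PySem.List.pyRange lo hi 1).foldl pvAStep (d, cur)

-- B's segment list, recursively: cuts (with their names) between lo and hi.
def pvSegs (cur : Option String) (lo hi : Int) :
    List (Int × Option String) → List (Option String × Int × Int)
  | [] => [(cur, lo, hi)]
  | (e, nm) :: rest => (cur, lo, e) :: pvSegs nm e hi rest

def pvSegFill (d : PySem.Dict Int (Option String))
    (segs : List (Option String × Int × Int)) : PySem.Dict Int (Option String) :=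
  segs.foldl (fun d p => pvRangeFill d p.1 p.2.1 p.2.2) d

-- Invariant of B's first scan (same as in forward-fill phrasing).
lemma pv_starts_get? (ps : List (Int × String)) (st : PySem.Dict String Int) (s : String) :
    (ps.foldl pvStartsStep st).get? s =
      if st.contains s then st.get? s
      else if pvSECTIONS.contains s then (ps.find? (fun q => q.2 == s)).map (·.1)
      else none := by
  induction ps generalizing st with
  | nil =>
    simp only [List.foldl_nil, List.find?_nil, Option.map_none]
    split_ifs with h1 h2
    · rfl
    · rw [PySem.Dict.get?_eq_none_iff_contains]; simpa using h1
    · rw [PySem.Dict.get?_eq_none_iff_contains]; simpa using h1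
  | cons p ps ih =>
    simp only [List.foldl_cons]
    rw [ih]
    unfold pvStartsStep
    by_cases hcond : (pvSECTIONS.contains p.2 && !(st.contains p.2)) = true
    · rw [if_pos hcond]
      obtain ⟨hsec, hnc⟩ : pvSECTIONS.contains p.2 = true ∧ st.contains p.2 = false := by
        constructor
        · cases hb : pvSECTIONS.contains p.2
          · rw [hb] at hcond; exact absurd hcond (by simp)
          · rfl
        · cases hb : st.contains p.2
          · rfl
          · rw [hb] at hcond; exact absurd hcond (by simp)
      by_cases hs : s = p.2
      · subst hs
        rw [if_pos (by rw [PySem.Dict.contains_insert]; simp)]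
        rw [PySem.Dict.get?_insert_self]
        rw [if_neg (by simp [hnc])]
        rw [if_pos hsec]
        rw [List.find?_cons_of_pos (by simp)]
        rfl
      · rw [PySem.Dict.contains_insert, PySem.Dict.get?_insert_of_ne _ _ hs]
        have hbe : (s == p.2) = false := by simpa using hs
        rw [hbe, Bool.false_or]
        have hne : ((fun q => q.2 == s) p) = false := by
          simpa using fun h => hs h.symm
        rw [List.find?_cons_of_neg (by simp [hne])]
    · rw [if_neg hcond]
      have hor : pvSECTIONS.contains p.2 = false ∨ st.contains p.2 = true := by
        cases hb : pvSECTIONS.contains p.2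
        · exact Or.inl rfl
        · cases hb2 : st.contains p.2
          · exact absurd (by rw [hb, hb2]; rfl) hcond
          · exact Or.inr rfl
      by_cases hstc : st.contains s = true
      · rw [if_pos hstc, if_pos hstc]
      · rw [if_neg hstc, if_neg hstc]
        by_cases hsec : pvSECTIONS.contains s = true
        · rw [if_pos hsec, if_pos hsec]
          have hne : (p.2 == s) = false := by
            simp only [beq_eq_false_iff_ne, ne_eq]
            intro he
            cases hor with
            | inl h => rw [he, hsec] at h; cases h
            | inr h => rw [he] at h; exact hstc h
          rw [List.find?_cons_of_neg (by simp [hne])]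
        · rw [if_neg hsec, if_neg hsec]

-- find? over enumerate = index? shifted by the start offset.
lemma pv_find_enumerate (c : List String) (off : Int) (s : String) :
    ((PySem.List.enumerate c off).find? (fun q => q.2 == s)).map (·.1)
      = (PySem.List.index? c s).map (fun k => off + (k : Int)) := by
  induction c generalizing off with
  | nil => simp [PySem.List.enumerate_nil]
  | cons x xs ih =>
    rw [PySem.List.enumerate_cons]
    by_cases hx : x = s
    · subst hx
      rw [PySem.List.index?_cons_self]
      rw [List.find?_cons_of_pos (by simp)]
      simp
    · have hbe : (x == s) = false := by simpa using hx
      rw [PySem.List.index?_cons_of_ne _ hx]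
      rw [List.find?_cons_of_neg (by simp [hbe])]
      rw [ih]
      cases PySem.List.index? xs s with
      | none => simp
      | some k =>
        simp
        omega

-- B's starts lookup at a section name is A's index? (as Int).
lemma pv_starts_eq_index? (c : List String) (s : String) (hs : pvSECTIONS.contains s = true) :
    ((PySem.List.enumerate c 0).foldl pvStartsStep PySem.Dict.empty).get? s
      = (PySem.List.index? c s).map (fun k => (k : Int)) := by
  rw [pv_starts_get?]
  rw [if_neg (by simp [PySem.Dict.contains_empty])]
  rw [if_pos hs, pv_find_enumerate]
  cases PySem.List.index? c s <;> simp

-- range fill peels its first index off as an insert.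
lemma pv_rangeFill_cons (d : PySem.Dict Int (Option String)) (nm : Option String)
    {lo hi : Int} (h : lo < hi) :
    pvRangeFill d nm lo hi = pvRangeFill (d.insert lo nm) nm (lo + 1) hi := by
  unfold pvRangeFill
  rw [PySem.List.pyRange_one_cons h, List.foldl_cons]

-- range fill over [lo, hi) does not touch lookups at k ≥ hi.
lemma pv_get?_rangeFill (d : PySem.Dict Int (Option String)) (nm : Option String)
    (lo hi k : Int) (h : hi ≤ k) :
    (pvRangeFill d nm lo hi).get? k = d.get? k := by
  by_cases hlt : lo < hi
  · rw [pv_rangeFill_cons d nm hlt,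
      pv_get?_rangeFill (d.insert lo nm) nm (lo + 1) hi k h,
      PySem.Dict.get?_insert_of_ne _ _ (by omega)]
  · unfold pvRangeFill
    rw [PySem.List.pyRange_one_eq_nil (by omega), List.foldl_nil]
termination_by (hi - lo).toNat
decreasing_by omega

-- A's forward fill over a cut-free range is a constant range fill.
lemma pv_afill_const (d : PySem.Dict Int (Option String)) (cur : Option String)
    (lo hi : Int) (h : ∀ i : Int, lo ≤ i → i < hi → d.contains i = false) :
    pvAFill d cur lo hi = (pvRangeFill d cur lo hi, cur) := by
  by_cases hlt : lo < hi
  · have hget : d.get? lo = none := by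
      rw [PySem.Dict.get?_eq_none_iff_contains]
      exact h lo le_rfl hlt
    unfold pvAFill
    rw [PySem.List.pyRange_one_cons hlt, List.foldl_cons]
    have hstep : pvAStep (d, cur) lo = (d.insert lo cur, cur) := by
      unfold pvAStep; rw [hget]; rfl
    rw [hstep]
    have := pv_afill_const (d.insert lo cur) cur (lo + 1) hi (by
      intro i h1 h2
      rw [PySem.Dict.contains_insert]
      have : (i == lo) = false := by simp; omega
      rw [this, Bool.false_or]
      exact h i (by omega) h2)
    unfold pvAFill at this
    rw [this, pv_rangeFill_cons d cur hlt]
  · unfold pvAFill pvRangeFill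
    rw [PySem.List.pyRange_one_eq_nil (by omega)]
    rfl
termination_by (hi - lo).toNat
decreasing_by omega

-- MAIN: A's stateful forward fill equals B's segment fill, given the cut list.
lemma pv_main (eds : List (Int × Option String))
    (d : PySem.Dict Int (Option String)) (cur : Option String) (lo hi : Int)
    (hsort : (eds.map (·.1)).Pairwise (· < ·))
    (hbound : ∀ p ∈ eds, lo ≤ p.1 ∧ p.1 < hi)
    (hget : ∀ p ∈ eds, d.get? p.1 = some p.2)
    (hkeys : ∀ i : Int, lo ≤ i → i < hi → d.contains i = true → i ∈ eds.map (·.1)) :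
    (pvAFill d cur lo hi).1 = pvSegFill d (pvSegs cur lo hi eds) := by
  induction eds generalizing d cur lo with
  | nil =>
    rw [pv_afill_const d cur lo hi (by
      intro i h1 h2
      cases hc : d.contains i
      · rfl
      · exact absurd (hkeys i h1 h2 hc) (by simp))]
    rfl
  | cons p rest ih =>
    obtain ⟨e, nm⟩ := p
    simp only [List.map_cons, List.pairwise_cons] at hsort
    obtain ⟨hlt_rest, hsort'⟩ := hsort
    obtain ⟨hloe, hehi⟩ := hbound (e, nm) (List.mem_cons_self)
    -- split A's range at e
    have hsplit : PySem.List.pyRange lo hi 1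
        = PySem.List.pyRange lo e 1 ++ (e :: PySem.List.pyRange (e + 1) hi 1) := by
      rw [PySem.List.pyRange_one_append lo e hi hloe (by omega),
        PySem.List.pyRange_one_cons hehi]
    -- first block [lo, e) is cut-free
    have hfree : ∀ i : Int, lo ≤ i → i < e → d.contains i = false := by
      intro i h1 h2
      cases hc : d.contains i
      · rfl
      · have hm := hkeys i h1 (by omega) hc
        simp only [List.map_cons, List.mem_cons] at hm
        rcases hm with h | h
        · omega
        · have := hlt_rest i h; omega
    have hconst := pv_afill_const d cur lo e hfree
    set d1 := pvRangeFill d cur lo e with hd1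
    -- value looked up at e is nm
    have hd1e : d1.get? e = some nm := by
      rw [hd1, pv_get?_rangeFill d cur lo e e le_rfl]
      exact hget (e, nm) (List.mem_cons_self)
    have hstepe : pvAStep (d1, cur) e = (d1.insert e nm, nm) := by
      unfold pvAStep; rw [hd1e]; rfl
    set d2 := d1.insert e nm with hd2
    -- A side becomes pvAFill d2 nm (e+1) hi
    have hA : pvAFill d cur lo hi = pvAFill d2 nm (e + 1) hi := by
      unfold pvAFill
      rw [hsplit, List.foldl_append]
      have : (PySem.List.pyRange lo e 1).foldl pvAStep (d, cur) = (d1, cur) := by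
        have h' := hconst; unfold pvAFill at h'; rw [h', hd1]
      rw [this, List.foldl_cons, hstepe]
    -- get?/contains of d2 are those of d above e
    have hd2get : ∀ k : Int, e < k → d2.get? k = d.get? k := by
      intro k hk
      rw [hd2, PySem.Dict.get?_insert_of_ne _ _ (by omega), hd1,
        pv_get?_rangeFill d cur lo e k (by omega)]
    have hd2contains : ∀ k : Int, e < k → d2.contains k = d.contains k := by
      intro k hk
      rw [PySem.Dict.contains_eq_isSome_get?, PySem.Dict.contains_eq_isSome_get?, hd2get k hk]
    have hIH := ih d2 nm (e + 1)
      hsort'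
      (by intro q hq
          have h1 := hlt_rest q.1 (List.mem_map_of_mem hq)
          have h2 := hbound q (List.mem_cons_of_mem _ hq)
          exact ⟨by omega, h2.2⟩)
      (by intro q hq
          rw [hd2get q.1 (hlt_rest q.1 (List.mem_map_of_mem hq))]
          exact hget q (List.mem_cons_of_mem _ hq))
      (by intro i h1 h2 hc
          rw [hd2contains i (by omega)] at hc
          have hm := hkeys i (by omega) h2 hc
          simp only [List.map_cons, List.mem_cons] at hm
          rcases hm with h | h
          · omega
          · exact h)
    rw [hA, hIH]
    -- B side: first segment, then shift the next segment's start from e to e+1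
    show pvSegFill d2 (pvSegs nm (e + 1) hi rest)
        = pvSegFill d (pvSegs cur lo hi ((e, nm) :: rest))
    have hB : pvSegFill d (pvSegs cur lo hi ((e, nm) :: rest))
        = pvSegFill d1 (pvSegs nm e hi rest) := by
      simp only [pvSegs, pvSegFill, List.foldl_cons, hd1]
    rw [hB]
    cases rest with
    | nil =>
      simp only [pvSegs, pvSegFill, List.foldl_cons, List.foldl_nil]
      rw [pv_rangeFill_cons d1 nm hehi, hd2]
    | cons q r =>
      obtain ⟨e2, nm2⟩ := q
      have he2 : e < e2 := hlt_rest e2 (by simp)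
      simp only [pvSegs, pvSegFill, List.foldl_cons]
      rw [pv_rangeFill_cons d1 nm he2, hd2]

-- B's zip of names with bound pairs is exactly pvSegs.
lemma pv_segs_zip (eds : List (Int × Option String)) (cur : Option String) (lo hi : Int) :
    (cur :: eds.map (·.2)).zip
        (((lo :: eds.map (·.1) ++ [hi]).zip ((lo :: eds.map (·.1) ++ [hi]).tail)))
      = pvSegs cur lo hi eds := by
  induction eds generalizing cur lo with
  | nil => rfl
  | cons p rest ih =>
    obtain ⟨e, nm⟩ := p
    simp only [List.map_cons, List.cons_append, List.tail_cons, List.zip_cons_cons, pvSegs]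
    rw [← ih nm e]
    rfl

-- every key of B's seed dict is a first-occurrence index: 0 ≤ k < length.
lemma pv_seed_bound (c : List String) (st : PySem.Dict String Int)
    (hst : ∀ s i, st.get? s = some i → 0 ≤ i ∧ i < (c.length : Int)) :
    ∀ (sections : List String) (d : PySem.Dict Int (Option String)),
      (∀ k : Int, d.contains k = true → 0 ≤ k ∧ k < (c.length : Int)) →
      ∀ k : Int,
        (sections.foldl (fun d s =>
          match st.get? s with
          | some i => d.insert i (some s)
          | none => d) d).contains k = true → 0 ≤ k ∧ k < (c.length : Int) := by
  intro sections
  induction sections with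
  | nil => intro d hd k hk; exact hd k hk
  | cons s ss ih =>
    intro d hd k hk
    simp only [List.foldl_cons] at hk
    cases hg : st.get? s with
    | none =>
      rw [hg] at hk
      exact ih d hd k hk
    | some i =>
      rw [hg] at hk
      refine ih _ ?_ k hk
      intro k' hk'
      rw [PySem.Dict.contains_insert] at hk'
      cases hbe : (k' == i) with
      | true => have : k' = i := by simpa using hbe
                subst this; exact hst s k' hg
      | false => rw [hbe, Bool.false_or] at hk'; exact hd k' hk'

-- the seed-building fold keeps keys unique.
lemma pv_seed_nodup (st : PySem.Dict String Int) :
    ∀ (sections : List String) (d : PySem.Dict Int (Option String)),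
      d.keys.Nodup →
      ((sections.foldl (fun d s =>
          match st.get? s with
          | some i => d.insert i (some s)
          | none => d) d).keys.Nodup) := by
  intro sections
  induction sections with
  | nil => intro d hd; exact hd
  | cons s ss ih =>
    intro d hd
    simp only [List.foldl_cons]
    cases hg : st.get? s with
    | none => exact ih d hd
    | some i => exact ih _ (PySem.Dict.nodup_keys_insert d i (some s) hd)

-- ===== VERDICT (by name: the statement is the Claim_ definition above) =====
theorem section_dictionary_spec : Claim_equal_section_dictionary := by
  intro content _
  unfold Spec_section_dictionary section_dictionary section_dictionary_alt
  set c := content.map PySem.Str.strip with hc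
  have hlam : (fun (st : PySem.Dict String Int) (p : Int × String) =>
      if pvSECTIONS.contains p.2 && !(st.contains p.2) then st.insert p.2 p.1 else st)
      = pvStartsStep := rfl
  simp only [hlam]
  set st := (PySem.List.enumerate c 0).foldl pvStartsStep PySem.Dict.empty with hst
  -- the two seed dictionaries agree
  have hseed :
      (["RUNSPEC", "GRID", "EDIT", "PROPS", "REGIONS", "SOLUTION", "SUMMARY",
        "SCHEDULE"] : List String).foldl (fun d s =>
        if PySem.List.count c s > 0 then
          match PySem.List.index? c s with
          | some k => d.insert (k : Int) (some s)
          | none => d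
        else d) PySem.Dict.empty
      = pvSECTIONS.foldl (fun d s =>
        match st.get? s with
        | some i => d.insert i (some s)
        | none => d) PySem.Dict.empty := by
    apply PySem.List.foldl_congr_mem
    intro d s hmem
    have hs : pvSECTIONS.contains s = true := by simpa [pvSECTIONS] using hmem
    rw [hst, pv_starts_eq_index? c s hs]
    cases hidx : PySem.List.index? c s with
    | none =>
      have hnm : s ∉ c := (PySem.List.index?_eq_none_iff _ _).mp hidx
      have hcnt : PySem.List.count c s = 0 := by
        rw [PySem.List.count_eq]; exact List.count_eq_zero.mpr hnm
      have hcnt0 : ¬ PySem.List.count c s > 0 := by omega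
      rw [if_neg hcnt0]
      rfl
    | some k =>
      have hmemc : s ∈ c := (PySem.List.index?_isSome_iff c s).mp (by rw [hidx]; rfl)
      have hcnt : PySem.List.count c s > 0 := by
        rw [PySem.List.count_eq]; exact List.count_pos_iff.mpr hmemc
      rw [if_pos hcnt]
      simp
  -- A's loop step is pvAStep
  have hstep : (fun (p : PySem.Dict Int (Option String) × Option String) (i : Int) =>
        let cur := match p.1.get? i with | some v => v | none => p.2
        (p.1.insert i cur, cur)) = pvAStep := by
    funext p i; unfold pvAStep; cases p.1.get? i <;> rfl
  simp only [hseed, hstep]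
  set n : Int := (c.length : Int) with hn
  set D0 := pvSECTIONS.foldl (fun d s =>
        match st.get? s with
        | some i => d.insert i (some s)
        | none => d) PySem.Dict.empty with hD0
  set cuts := PySem.List.sorted D0.keys (fun x => x) false with hcuts
  set f : Int → Option String := fun c0 => (D0.get? c0).getD none with hf
  set eds := cuts.map (fun c0 => (c0, f c0)) with heds
  have heds_fst : eds.map (·.1) = cuts := by
    simp [heds, List.map_map, Function.comp_def]
  have heds_snd : eds.map (·.2) = cuts.map f := by
    simp [heds, List.map_map, Function.comp_def]
  -- bounds on st values
  have hstval : ∀ s i, st.get? s = some i → 0 ≤ i ∧ i < n := by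
    intro s i hgi
    by_cases hs : pvSECTIONS.contains s = true
    · rw [hst, pv_starts_eq_index? c s hs] at hgi
      cases hidx : PySem.List.index? c s with
      | none => rw [hidx] at hgi; cases hgi
      | some k =>
        rw [hidx] at hgi
        obtain ⟨hk, _, _⟩ := PySem.List.getElem_of_index?_eq_some hidx
        simp at hgi
        constructor <;> omega
    · rw [hst, pv_starts_get?] at hgi
      rw [if_neg (by simp [PySem.Dict.contains_empty]),
        if_neg hs] at hgi
      cases hgi
  -- membership in cuts ↔ D0.contains
  have hmemcuts : ∀ k : Int, k ∈ cuts ↔ D0.contains k = true := by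
    intro k
    rw [hcuts, PySem.List.mem_sorted, ← PySem.Dict.contains_iff_mem_keys]
  -- keys of D0 lie in [0, n)
  have hbound0 : ∀ k : Int, D0.contains k = true → 0 ≤ k ∧ k < n := by
    intro k hk
    exact pv_seed_bound c st hstval pvSECTIONS PySem.Dict.empty
      (by intro k' hk'; rw [PySem.Dict.contains_empty] at hk'; cases hk') k hk
  -- cuts is strictly increasing
  have hnodup_keys : D0.keys.Nodup :=
    pv_seed_nodup st pvSECTIONS PySem.Dict.empty (by simp [PySem.Dict.keys_empty])
  have hnodup_cuts : cuts.Nodup :=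
    ((PySem.List.sorted_perm D0.keys (fun x => x) false).nodup_iff).mpr hnodup_keys
  have hle : cuts.Pairwise (· ≤ ·) := by
    rw [hcuts]
    exact PySem.List.sorted_pairwise (xs := D0.keys) (key := fun x => x)
  have hsort : (eds.map (·.1)).Pairwise (· < ·) := by
    rw [heds_fst]
    exact (hle.and hnodup_cuts).imp (fun h => lt_of_le_of_ne h.1 h.2)
  -- the main hypotheses and the segment equivalence
  have hmain := pv_main eds D0 none 0 n hsort
    (by intro p hp
        rw [heds] at hp
        obtain ⟨c0, hc0, rfl⟩ := List.mem_map.mp hp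
        exact hbound0 c0 ((hmemcuts c0).mp hc0))
    (by intro p hp
        rw [heds] at hp
        obtain ⟨c0, hc0, rfl⟩ := List.mem_map.mp hp
        have hcon := (hmemcuts c0).mp hc0
        rw [PySem.Dict.contains_eq_isSome_get?] at hcon
        obtain ⟨v, hg⟩ := Option.isSome_iff_exists.mp hcon
        simp only [hf, hg, Option.getD_some])
    (by intro i _ _ hcon
        rw [heds_fst]
        exact (hmemcuts i).mpr hcon)
  have hzip := pv_segs_zip eds none 0 n
  rw [heds_fst, heds_snd] at hzip
  unfold pvAFill at hmain
  unfold pvSegFill at hmain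
  rw [← hzip] at hmain
  exact congrArg PySem.Dict.items hmain
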